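-- pv_equiv track=rewrite | github.com/tipsyboy/Algorithm | Programmers/kakao blind 2021/2_메뉴 리뉴얼.py | get_cadidates
-- ===== SOURCE A (Python) =====
-- from itertools import combinations
--
-- def get_cadidates(orders: list, menu_cnt: int) -> list:
--     candidates = []
--     for order in orders:
--         if len(order) < menu_cnt:
--             continue
--         for combination in combinations(sorted(order), menu_cnt):
--             candidates.append("".join(combination))
--
--     return candidates
-- ===== SOURCE B (Python) =====
-- def _combs(chars, need, prefix, out):
--     # emit, in itertools order, all size-`need` combinations of `chars` prefixed by `prefix`
--     if need == 0:
--         out.append("".join(prefix))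
--     elif len(chars) < need:
--         return
--     else:
--         _combs(chars[1:], need - 1, prefix + [chars[0]], out)
--         _combs(chars[1:], need, prefix, out)
--
--
-- def get_cadidates(orders: list, menu_cnt: int) -> list:
--     candidates = []
--     for order in orders:
--         if len(order) < menu_cnt:
--             continue
--         _combs(sorted(order), menu_cnt, [], candidates)
--     return candidates
-- ===== Notes on version B (the rewrite author's own statement) =====
-- stated objective: alternative
-- what changed: Replaces itertools.combinations with a hand-rolled pick-before-skip backtracking recursion that builds each combination through an explicit prefix accumulator, emitting joined strings directly into the shared candidates list.
import Mathlib
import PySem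

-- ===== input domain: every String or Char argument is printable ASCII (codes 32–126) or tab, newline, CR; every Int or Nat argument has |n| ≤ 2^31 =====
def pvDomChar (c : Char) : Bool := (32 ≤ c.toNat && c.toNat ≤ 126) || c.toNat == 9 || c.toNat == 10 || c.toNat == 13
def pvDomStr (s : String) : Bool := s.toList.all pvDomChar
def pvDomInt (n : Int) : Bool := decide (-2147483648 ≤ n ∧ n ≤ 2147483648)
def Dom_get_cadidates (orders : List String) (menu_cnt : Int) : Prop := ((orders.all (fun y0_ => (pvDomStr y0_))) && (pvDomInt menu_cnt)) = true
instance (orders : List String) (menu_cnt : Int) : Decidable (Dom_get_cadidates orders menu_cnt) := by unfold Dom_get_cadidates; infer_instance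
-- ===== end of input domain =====

-- B replaces itertools.combinations with an explicit pick-before-skip backtracking
-- recursion over the sorted characters (objective: alternative decomposition, same cost).

-- ===== PORT A =====
-- itertools.combinations(xs, r) over a list, in itertools' emission order
def pyCombinations (xs : List Char) (r : Nat) : List (List Char) :=
  match r, xs with
  | 0, _ => [[]]
  | _ + 1, [] => []
  | n + 1, x :: rest => (pyCombinations rest n).map (fun c => x :: c) ++ pyCombinations rest (n + 1)

def get_cadidates (orders : List String) (menu_cnt : Int) : List String :=
  orders.foldl (fun candidates order =>
    if (order.toList.length : Int) < menu_cnt then candidates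
    else (pyCombinations (PySem.List.sorted order.toList (fun c => c) false) menu_cnt.toNat).foldl
      (fun cand combination => cand ++ [String.mk combination]) candidates) []

-- ===== PORT B =====
-- _combs(chars, need, prefix, out): pick chars[0] first, then skip it
def combsB (chars : List Char) (need : Nat) (pre : List Char) (out : List String) : List String :=
  if need = 0 then out ++ [String.mk pre]
  else if chars.length < need then out
  else match chars with
    | [] => out   -- unreachable: chars.length < need already handled
    | c :: rest => combsB rest need pre (combsB rest (need - 1) (pre ++ [c]) out)
termination_by chars

def get_cadidates_alt (orders : List String) (menu_cnt : Int) : List String :=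
  orders.foldl (fun candidates order =>
    if (order.toList.length : Int) < menu_cnt then candidates
    else combsB (PySem.List.sorted order.toList (fun c => c) false) menu_cnt.toNat [] candidates) []

-- ===== PRECONDITION & SPEC =====
-- Pre_ excludes exactly the inputs where Python A raises: combinations(..., r) with negative r
-- raises ValueError, which is reached whenever orders is non-empty and menu_cnt < 0.
def Pre_get_cadidates (orders : List String) (menu_cnt : Int) : Prop :=
  0 ≤ menu_cnt ∨ orders = []
instance (orders : List String) (menu_cnt : Int) : Decidable (Pre_get_cadidates orders menu_cnt) := by
  unfold Pre_get_cadidates; infer_instance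

def pvWitness_get_cadidates : List String × Int := (["cab", "a"], 2)

def Spec_get_cadidates (orders : List String) (menu_cnt : Int) (out : List String) : Prop := out = get_cadidates_alt orders menu_cnt
instance (orders : List String) (menu_cnt : Int) (out : List String) : Decidable (Spec_get_cadidates orders menu_cnt out) := by unfold Spec_get_cadidates; infer_instance

-- ===== CLAIM (what is proved, stated in full; the proofs are below) =====
def Claim_equal_get_cadidates : Prop := ∀ (orders : List String) (menu_cnt : Int), Dom_get_cadidates orders menu_cnt → Pre_get_cadidates orders menu_cnt → Spec_get_cadidates orders menu_cnt (get_cadidates orders menu_cnt)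

-- ===== LEMMAS AND PROOFS =====

theorem pyCombinations_eq_nil_of_short (xs : List Char) (n : Nat) (h : xs.length < n) :
    pyCombinations xs n = [] := by
  induction xs generalizing n with
  | nil => cases n with
    | zero => omega
    | succ k => simp [pyCombinations]
  | cons x rest ih =>
    cases n with
    | zero => omega
    | succ k =>
      simp only [pyCombinations]
      rw [ih k (by simpa using Nat.lt_of_succ_lt_succ h), ih (k + 1) (by simp at h; omega)]
      simp

theorem combsB_spec (chars : List Char) (need : Nat) (pre : List Char) (out : List String) :
    combsB chars need pre out =
      out ++ (pyCombinations chars need).map (fun c => String.mk (pre ++ c)) := by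
  induction chars generalizing need pre out with
  | nil =>
    cases need with
    | zero => simp [combsB, pyCombinations]
    | succ k => simp [combsB, pyCombinations]
  | cons c rest ih =>
    cases need with
    | zero => simp [combsB, pyCombinations]
    | succ k =>
      by_cases hlen : (c :: rest).length < k + 1
      · rw [combsB]
        simp only [if_neg (Nat.succ_ne_zero k), if_pos hlen,
          pyCombinations_eq_nil_of_short _ _ hlen]
        simp
      · rw [combsB]
        simp only [if_neg (Nat.succ_ne_zero k), if_neg hlen]
        rw [ih, ih]
        simp [pyCombinations, List.map_map, Function.comp_def]

theorem foldl_append_map (l : List (List Char)) (acc : List String) :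
    l.foldl (fun cand combination => cand ++ [String.mk combination]) acc
      = acc ++ l.map String.mk := by
  induction l generalizing acc with
  | nil => simp
  | cons x t ih => simp [List.foldl_cons, ih]

-- ===== VERDICT (by name: the statement is the Claim_ definition above) =====
theorem get_cadidates_spec : Claim_equal_get_cadidates := by
  intro orders menu_cnt _ _
  unfold Spec_get_cadidates get_cadidates get_cadidates_alt
  have hstep : ∀ (cand : List String) (order : String),
      (if (order.toList.length : Int) < menu_cnt then cand
        else (pyCombinations (PySem.List.sorted order.toList (fun c => c) false) menu_cnt.toNat).foldl
          (fun c combination => c ++ [String.mk combination]) cand)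
      = (if (order.toList.length : Int) < menu_cnt then cand
        else combsB (PySem.List.sorted order.toList (fun c => c) false) menu_cnt.toNat [] cand) := by
    intro cand order
    by_cases h : (order.toList.length : Int) < menu_cnt
    · simp only [if_pos h]
    · simp only [if_neg h, combsB_spec, foldl_append_map]
      simp
  exact congrArg (fun f => List.foldl f [] orders)
    (funext fun c => funext fun o => hstep c o)
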